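-- pv_equiv track=rewrite | github.com/ovenzeze/hugo-tour-dashboard | podcast_mixer_segments.py | generate_default_segments
-- ===== SOURCE A (Python) =====
-- def generate_default_segments(audio1_length, audio2_length, segment_duration=10000):
--     """
--     生成默认的片段设置，每个人说话10秒钟（10000毫秒）
--     """
--     segments = []
--     current_time1 = 0
--     current_time2 = 0
--
--     # 交替添加片段，直到两个音频都用完
--     while current_time1 < audio1_length or current_time2 < audio2_length:
--         # 添加第一个人的片段
--         if current_time1 < audio1_length:
--             end_time = min(current_time1 + segment_duration, audio1_length)
--             segments.append({
--                 "speaker": 1,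
--                 "start": current_time1,
--                 "end": end_time
--             })
--             current_time1 = end_time
--
--         # 添加第二个人的片段
--         if current_time2 < audio2_length:
--             end_time = min(current_time2 + segment_duration, audio2_length)
--             segments.append({
--                 "speaker": 2,
--                 "start": current_time2,
--                 "end": end_time
--             })
--             current_time2 = end_time
--
--     return segments
-- ===== SOURCE B (Python) =====
-- def generate_default_segments(audio1_length, audio2_length, segment_duration=10000):
--     if audio1_length <= 0 and audio2_length <= 0:
--         return []
--     if segment_duration <= 0:
--         raise ValueError("segment_duration must be positive")
--     sd = segment_duration
--     n1 = (audio1_length + sd - 1) // sd if audio1_length > 0 else 0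
--     n2 = (audio2_length + sd - 1) // sd if audio2_length > 0 else 0
--     m = min(n1, n2)
--     out = [None] * (n1 + n2)
--     for i in range(m):
--         s = i * sd
--         out[2 * i] = {"speaker": 1, "start": s, "end": min(s + sd, audio1_length)}
--         out[2 * i + 1] = {"speaker": 2, "start": s, "end": min(s + sd, audio2_length)}
--     for i in range(m, n1):
--         s = i * sd
--         out[m + i] = {"speaker": 1, "start": s, "end": min(s + sd, audio1_length)}
--     for i in range(m, n2):
--         s = i * sd
--         out[m + i] = {"speaker": 2, "start": s, "end": min(s + sd, audio2_length)}
--     return out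
-- ===== Notes on version B (the rewrite author's own statement) =====
-- stated objective: alternative
-- what changed: Replaces A's dual-cursor alternating while loop with closed-form chunk counts ((length+sd-1)//sd) and three index-driven range loops filling a preallocated output (paired part, then the two leftovers); when there is audio, B raises ValueError on nonpositive segment_duration instead of looping forever.
import Mathlib
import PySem

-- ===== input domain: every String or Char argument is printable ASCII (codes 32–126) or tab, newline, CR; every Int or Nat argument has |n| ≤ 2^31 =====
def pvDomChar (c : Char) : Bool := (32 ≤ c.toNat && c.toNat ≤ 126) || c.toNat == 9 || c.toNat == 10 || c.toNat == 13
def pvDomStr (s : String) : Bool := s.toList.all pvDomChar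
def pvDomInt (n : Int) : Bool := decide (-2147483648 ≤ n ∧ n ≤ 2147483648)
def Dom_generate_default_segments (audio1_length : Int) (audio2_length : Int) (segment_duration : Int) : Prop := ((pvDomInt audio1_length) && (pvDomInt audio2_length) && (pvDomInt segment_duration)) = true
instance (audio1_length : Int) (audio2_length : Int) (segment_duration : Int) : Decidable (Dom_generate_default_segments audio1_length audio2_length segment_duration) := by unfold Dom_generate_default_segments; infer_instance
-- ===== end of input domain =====

-- B computes each speaker's chunk count in closed form and builds every segment directly from
-- its index over range loops, instead of A's dual-cursor while loop; B raises ValueError on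
-- nonpositive segment_duration (where A loops forever, or returns [] if both lengths are ≤ 0).
-- Return-value equivalence only (neither program mutates its arguments).

-- ===== PORT A =====
-- A's while loop, fuel-indexed (the Python loop diverges when segment_duration ≤ 0 and
-- some length is positive; Pre_ excludes nonpositive durations, where enough fuel is provided).
def pvLoopA (a1 a2 seg : Int) : Nat → Int → Int → List (List (String × Int))
  | 0, _, _ => []
  | fuel+1, t1, t2 =>
    if t1 < a1 ∨ t2 < a2 then
      let (s1, t1') :=
        if t1 < a1 then
          let e := min (t1 + seg) a1
          ([[("speaker", (1 : Int)), ("start", t1), ("end", e)]], e)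
        else ([], t1)
      let (s2, t2') :=
        if t2 < a2 then
          let e := min (t2 + seg) a2
          ([[("speaker", (2 : Int)), ("start", t2), ("end", e)]], e)
        else ([], t2)
      s1 ++ s2 ++ pvLoopA a1 a2 seg fuel t1' t2'
    else []

def generate_default_segments (audio1_length : Int) (audio2_length : Int) (segment_duration : Int) : List (List (String × Int)) :=
  pvLoopA audio1_length audio2_length segment_duration
    (audio1_length.toNat + audio2_length.toNat + 1) 0 0

-- ===== PORT B =====
-- the dict {"speaker": spk, "start": i*sd, "end": min(i*sd + sd, len)} built in Source B's loop bodies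
def pvSegAt (spk len sd i : Int) : List (String × Int) :=
  [("speaker", spk), ("start", i * sd), ("end", min (i * sd + sd) len)]

-- Source B: n = (length + sd - 1) // sd if length > 0 else 0
def pvNChunks (len sd : Int) : Int :=
  if 0 < len then PySem.Int.floordiv (len + sd - 1) sd else 0

-- Source B preallocates out = [None]*(n1+n2) and writes slots 2*i, 2*i+1 (paired loop) and m+i
-- (leftover loops) in strictly increasing slot order, so each loop appends its elements
-- left to right; the folds below build the same list in that same order.
def generate_default_segments_alt (audio1_length : Int) (audio2_length : Int) (segment_duration : Int) : List (List (String × Int)) :=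
  if audio1_length ≤ 0 ∧ audio2_length ≤ 0 then []  -- no audio: nothing to segment
  else if segment_duration ≤ 0 then []  -- Python B raises ValueError here (outside Pre_)
  else
    ((PySem.List.pyRange 0 (min (pvNChunks audio1_length segment_duration) (pvNChunks audio2_length segment_duration)) 1).foldl
        (fun out i => out ++ [pvSegAt 1 audio1_length segment_duration i, pvSegAt 2 audio2_length segment_duration i]) [])
      ++ ((PySem.List.pyRange (min (pvNChunks audio1_length segment_duration) (pvNChunks audio2_length segment_duration)) (pvNChunks audio1_length segment_duration) 1).foldl
        (fun out i => out ++ [pvSegAt 1 audio1_length segment_duration i]) [])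
      ++ ((PySem.List.pyRange (min (pvNChunks audio1_length segment_duration) (pvNChunks audio2_length segment_duration)) (pvNChunks audio2_length segment_duration) 1).foldl
        (fun out i => out ++ [pvSegAt 2 audio2_length segment_duration i]) [])

-- ===== PRECONDITION & SPEC =====
-- Pre_ excludes exactly the inputs on which A's while loop never terminates (nonpositive
-- segment_duration while some audio length is positive); A returns on all other inputs.
def Pre_generate_default_segments (audio1_length : Int) (audio2_length : Int) (segment_duration : Int) : Prop :=
  0 < segment_duration ∨ (audio1_length ≤ 0 ∧ audio2_length ≤ 0)
instance (audio1_length : Int) (audio2_length : Int) (segment_duration : Int) : Decidable (Pre_generate_default_segments audio1_length audio2_length segment_duration) := by unfold Pre_generate_default_segments; infer_instance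

def pvWitness_generate_default_segments : Int × Int × Int := (25, 7, 10)

def Spec_generate_default_segments (audio1_length : Int) (audio2_length : Int) (segment_duration : Int) (out : List (List (String × Int))) : Prop := out = generate_default_segments_alt audio1_length audio2_length segment_duration
instance (audio1_length : Int) (audio2_length : Int) (segment_duration : Int) (out : List (List (String × Int))) : Decidable (Spec_generate_default_segments audio1_length audio2_length segment_duration out) := by unfold Spec_generate_default_segments; infer_instance

-- ===== CLAIM (what is proved, stated in full; the proofs are below) =====
def Claim_equal_generate_default_segments : Prop := ∀ (audio1_length : Int) (audio2_length : Int) (segment_duration : Int), Dom_generate_default_segments audio1_length audio2_length segment_duration → Pre_generate_default_segments audio1_length audio2_length segment_duration → Spec_generate_default_segments audio1_length audio2_length segment_duration (generate_default_segments audio1_length audio2_length segment_duration)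

-- ===== LEMMAS AND PROOFS =====

-- proof-side model of one speaker's chunking (A's per-speaker progress), fuel-indexed
def pvChunks (len seg spk : Int) : Nat → Int → List (List (String × Int))
  | 0, _ => []
  | fuel+1, t =>
    if t < len then
      let e := min (t + seg) len
      [("speaker", spk), ("start", t), ("end", e)] :: pvChunks len seg spk fuel e
    else []

-- proof-side interleaving of the two chunk lists
def pvInterleave : List (List (String × Int)) → List (List (String × Int)) → List (List (String × Int))
  | x :: xs, y :: ys => x :: y :: pvInterleave xs ys
  | xs, ys => xs ++ ys

lemma pvChunks_stop (len seg spk : Int) (fuel : Nat) (t : Int) (h : ¬ t < len) :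
    pvChunks len seg spk fuel t = [] := by
  cases fuel with
  | zero => rfl
  | succ n => simp [pvChunks, h]

lemma pvInterleave_nil_right (xs : List (List (String × Int))) : pvInterleave xs [] = xs := by
  cases xs <;> simp [pvInterleave]

lemma pvInterleave_nil_left (ys : List (List (String × Int))) : pvInterleave [] ys = ys := by
  cases ys <;> simp [pvInterleave]

lemma pvInterleave_cons (x y : List (String × Int)) (xs ys : List (List (String × Int))) :
    pvInterleave (x :: xs) (y :: ys) = x :: y :: pvInterleave xs ys := rfl

-- A's interlocked loop equals the interleaving of the two independent chunk sequences.
lemma pvLoop_eq (a1 a2 seg : Int) (hseg : 0 < seg) :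
    ∀ (fuel f1 f2 : Nat) (t1 t2 : Int),
      (a1 - t1).toNat ≤ f1 → (a2 - t2).toNat ≤ f2 →
      (a1 - t1).toNat + (a2 - t2).toNat ≤ fuel →
      pvLoopA a1 a2 seg fuel t1 t2 =
        pvInterleave (pvChunks a1 seg 1 f1 t1) (pvChunks a2 seg 2 f2 t2) := by
  intro fuel
  induction fuel with
  | zero =>
    intro f1 f2 t1 t2 h1 h2 hs
    have ht1 : ¬ t1 < a1 := by omega
    have ht2 : ¬ t2 < a2 := by omega
    rw [pvChunks_stop _ _ _ _ _ ht1, pvChunks_stop _ _ _ _ _ ht2]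
    rfl
  | succ n ih =>
    intro f1 f2 t1 t2 h1 h2 hs
    by_cases hA : t1 < a1 <;> by_cases hB : t2 < a2
    · have he1 : t1 < min (t1 + seg) a1 := lt_min (by omega) hA
      have he1' : min (t1 + seg) a1 ≤ a1 := min_le_right _ _
      have he2 : t2 < min (t2 + seg) a2 := lt_min (by omega) hB
      have he2' : min (t2 + seg) a2 ≤ a2 := min_le_right _ _
      obtain ⟨g1, rfl⟩ : ∃ g1, f1 = g1 + 1 := ⟨f1 - 1, by omega⟩
      obtain ⟨g2, rfl⟩ : ∃ g2, f2 = g2 + 1 := ⟨f2 - 1, by omega⟩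
      simp only [pvLoopA, pvChunks, if_pos hA, if_pos hB, if_pos (Or.inl hA)]
      rw [ih g1 g2 _ _ (by omega) (by omega) (by omega), pvInterleave_cons]
      rfl
    · have he1 : t1 < min (t1 + seg) a1 := lt_min (by omega) hA
      have he1' : min (t1 + seg) a1 ≤ a1 := min_le_right _ _
      obtain ⟨g1, rfl⟩ : ∃ g1, f1 = g1 + 1 := ⟨f1 - 1, by omega⟩
      simp only [pvLoopA, pvChunks, if_pos hA, if_neg hB, if_pos (Or.inl hA)]
      rw [ih g1 f2 _ _ (by omega) (by omega) (by omega),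
          pvChunks_stop _ _ _ f2 _ hB, pvInterleave_nil_right, pvInterleave_nil_right]
      rfl
    · have he2 : t2 < min (t2 + seg) a2 := lt_min (by omega) hB
      have he2' : min (t2 + seg) a2 ≤ a2 := min_le_right _ _
      obtain ⟨g2, rfl⟩ : ∃ g2, f2 = g2 + 1 := ⟨f2 - 1, by omega⟩
      simp only [pvLoopA, pvChunks, if_neg hA, if_pos hB, if_pos (Or.inr hB)]
      rw [ih f1 g2 _ _ (by omega) (by omega) (by omega),
          pvChunks_stop _ _ _ f1 _ hA, pvInterleave_nil_left, pvInterleave_nil_left]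
      rfl
    · rw [pvChunks_stop _ _ _ _ _ hA, pvChunks_stop _ _ _ _ _ hB]
      simp [pvLoopA, hA, hB, pvInterleave]

-- index i is a valid chunk index iff its start lies before the end of the audio
lemma pvLt_nchunks_iff (len sd i : Int) (hsd : 0 < sd) (hi : 0 ≤ i) :
    i < pvNChunks len sd ↔ i * sd < len := by
  unfold pvNChunks
  split_ifs with hlen
  · have hbr := PySem.Int.le_floordiv_iff_mul_le (a := len + sd - 1) (b := sd) (q := i + 1) hsd
    have hring : (i + 1) * sd = i * sd + sd := by ring
    constructor
    · intro h
      have := hbr.mp (by omega)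
      omega
    · intro h
      have := hbr.mpr (by omega)
      omega
  · have hmul : 0 ≤ i * sd := mul_nonneg hi hsd.le
    omega

lemma pvNChunks_nonneg (len sd : Int) (hsd : 0 < sd) : 0 ≤ pvNChunks len sd := by
  unfold pvNChunks
  split_ifs with hlen
  · have hbr := PySem.Int.le_floordiv_iff_mul_le (a := len + sd - 1) (b := sd) (q := 0) hsd
    have := hbr.mpr (by omega)
    omega
  · omega

-- one speaker's chunk sequence from cursor i*sd equals the index range [i, nchunks)
lemma pvChunks_closed (len sd spk : Int) (hsd : 0 < sd) :
    ∀ (fuel : Nat) (i : Int), 0 ≤ i → (len - i * sd).toNat ≤ fuel →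
      pvChunks len sd spk fuel (i * sd) =
        (PySem.List.pyRange i (pvNChunks len sd) 1).map (pvSegAt spk len sd) := by
  intro fuel
  induction fuel with
  | zero =>
    intro i hi hf
    have hstop : ¬ i * sd < len := by omega
    rw [pvChunks_stop _ _ _ _ _ hstop,
        PySem.List.pyRange_one_eq_nil (by
          have := (pvLt_nchunks_iff len sd i hsd hi)
          omega)]
    rfl
  | succ n ih =>
    intro i hi hf
    by_cases h : i * sd < len
    · have hin : i < pvNChunks len sd := (pvLt_nchunks_iff len sd i hsd hi).mpr h
      rw [PySem.List.pyRange_one_cons hin]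
      simp only [pvChunks, if_pos h, List.map_cons]
      have hring : i * sd + sd = (i + 1) * sd := by ring
      by_cases h2 : (i + 1) * sd < len
      · have hmin : min (i * sd + sd) len = (i + 1) * sd := by rw [hring]; exact min_eq_left h2.le
        rw [hmin]
        rw [ih (i + 1) (by omega) (by omega)]
        unfold pvSegAt
        rw [hmin]
      · have hmin : min (i * sd + sd) len = len := by rw [hring]; exact min_eq_right (by omega)
        rw [hmin, pvChunks_stop _ _ _ _ _ (lt_irrefl len),
            PySem.List.pyRange_one_eq_nil (by
              have := (pvLt_nchunks_iff len sd (i + 1) hsd (by omega))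
              omega)]
        unfold pvSegAt
        rw [hmin]
        rfl
    · rw [pvChunks_stop _ _ _ _ _ h,
          PySem.List.pyRange_one_eq_nil (by
            have := (pvLt_nchunks_iff len sd i hsd hi)
            omega)]
      rfl

-- interleaving two mapped index ranges = paired part up to min, then the two leftovers
lemma pvInterleave_ranges (n1 n2 : Int) (f g : Int → List (String × Int)) :
    ∀ (k : Nat) (i : Int), i ≤ min n1 n2 → ((min n1 n2) - i).toNat ≤ k →
      pvInterleave ((PySem.List.pyRange i n1 1).map f) ((PySem.List.pyRange i n2 1).map g) =
        ((PySem.List.pyRange i (min n1 n2) 1).flatMap (fun j => [f j, g j]))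
          ++ ((PySem.List.pyRange (min n1 n2) n1 1).map f)
          ++ ((PySem.List.pyRange (min n1 n2) n2 1).map g) := by
  intro k
  induction k with
  | zero =>
    intro i hle hk
    have hi : i = min n1 n2 := by omega
    subst hi
    rw [PySem.List.pyRange_one_eq_nil (le_refl _)]
    rcases le_total n1 n2 with h | h
    · have hm : min n1 n2 = n1 := min_eq_left h
      rw [hm, PySem.List.pyRange_one_eq_nil (le_refl n1)]
      simp [pvInterleave_nil_left]
    · have hm : min n1 n2 = n2 := min_eq_right h
      rw [hm, PySem.List.pyRange_one_eq_nil (le_refl n2)]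
      simp [pvInterleave_nil_right]
  | succ k ih =>
    intro i hle hk
    by_cases hi : i < min n1 n2
    · have h1 : i < n1 := lt_of_lt_of_le hi (min_le_left _ _)
      have h2 : i < n2 := lt_of_lt_of_le hi (min_le_right _ _)
      rw [PySem.List.pyRange_one_cons h1, PySem.List.pyRange_one_cons h2,
          PySem.List.pyRange_one_cons hi, List.map_cons, List.map_cons,
          pvInterleave_cons, List.flatMap_cons,
          ih (i + 1) (by omega) (by omega)]
      simp
    · have hieq : i = min n1 n2 := by omega
      subst hieq
      rw [PySem.List.pyRange_one_eq_nil (le_refl _)]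
      rcases le_total n1 n2 with h | h
      · have hm : min n1 n2 = n1 := min_eq_left h
        rw [hm, PySem.List.pyRange_one_eq_nil (le_refl n1)]
        simp [pvInterleave_nil_left]
      · have hm : min n1 n2 = n2 := min_eq_right h
        rw [hm, PySem.List.pyRange_one_eq_nil (le_refl n2)]
        simp [pvInterleave_nil_right]

-- ===== VERDICT (by name: the statement is the Claim_ definition above) =====
theorem generate_default_segments_spec : Claim_equal_generate_default_segments := by
  intro a1 a2 sd _ hpre
  unfold Spec_generate_default_segments generate_default_segments generate_default_segments_alt
  by_cases hz : a1 ≤ 0 ∧ a2 ≤ 0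
  · rw [if_pos hz]
    have h1 : ¬ ((0:Int) < a1 ∨ (0:Int) < a2) := by omega
    have hfuel : a1.toNat + a2.toNat + 1 = 1 := by omega
    rw [hfuel]
    simp [pvLoopA, h1]
  have hsd : 0 < sd := by unfold Pre_generate_default_segments at hpre; omega
  rw [if_neg hz, if_neg (by omega)]
  have hn1 := pvNChunks_nonneg a1 sd hsd
  have hn2 := pvNChunks_nonneg a2 sd hsd
  rw [PySem.List.foldl_append_eq_flatMap (fun j => [pvSegAt 1 a1 sd j, pvSegAt 2 a2 sd j]),
      PySem.List.foldl_append_singleton_eq_map (pvSegAt 1 a1 sd),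
      PySem.List.foldl_append_singleton_eq_map (pvSegAt 2 a2 sd)]
  simp only [List.nil_append]
  rw [← pvInterleave_ranges (pvNChunks a1 sd) (pvNChunks a2 sd)
        (pvSegAt 1 a1 sd) (pvSegAt 2 a2 sd)
        ((min (pvNChunks a1 sd) (pvNChunks a2 sd)).toNat) 0 (by omega) (by omega)]
  have hc1 := pvChunks_closed a1 sd 1 hsd (a1.toNat + 1) 0 (le_refl 0) (by omega)
  have hc2 := pvChunks_closed a2 sd 2 hsd (a2.toNat + 1) 0 (le_refl 0) (by omega)
  rw [zero_mul] at hc1 hc2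
  rw [← hc1, ← hc2]
  exact pvLoop_eq a1 a2 sd hsd _ _ _ 0 0 (by omega) (by omega) (by omega)
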